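-- pv_equiv track=rewrite | github.com/romedikc/Leetcoding | codesignal/most digits.py | solution
-- ===== SOURCE A (Python) =====
-- from collections import Counter
--
-- def solution(a):
--     digits = []
--     for i in a:
--         digits.extend([int(n) for n in str(i)])
--
--     freq = Counter(digits)
--     max_value = max(freq.values())
--     top_keys = [k for k, v in freq.items() if v == max_value]
--
--     return sorted(top_keys)
-- ===== SOURCE B (Python) =====
-- def solution(a):
--     digits = sorted(int(c) for i in a for c in str(i))
--     best, m, run, prev = [], 0, 0, None
--     for d in digits:
--         run = run + 1 if d == prev else 1
--         prev = d
--         if run > m: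
--             m, best = run, [d]
--         elif run == m:
--             best.append(d)
--     return best
-- ===== Notes on version B (the rewrite author's own statement) =====
-- stated objective: alternative
-- what changed: B sorts the extracted digit list once and scans adjacent runs with a running maximum, building the winner list in ascending order as it goes, instead of hashing counts into a Counter and sorting the winning keys afterwards.
import Mathlib
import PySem

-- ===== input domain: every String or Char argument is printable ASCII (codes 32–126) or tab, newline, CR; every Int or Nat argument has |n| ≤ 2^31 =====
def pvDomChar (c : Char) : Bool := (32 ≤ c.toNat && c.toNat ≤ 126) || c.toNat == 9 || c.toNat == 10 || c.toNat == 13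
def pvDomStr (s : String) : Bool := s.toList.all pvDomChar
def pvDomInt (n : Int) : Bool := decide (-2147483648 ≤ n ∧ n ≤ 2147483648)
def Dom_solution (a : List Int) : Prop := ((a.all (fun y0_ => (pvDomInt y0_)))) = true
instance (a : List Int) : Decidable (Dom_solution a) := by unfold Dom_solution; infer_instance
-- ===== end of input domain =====

-- B replaces Counter hashing and the final sort of the winners by sorting the digit list once and
-- scanning adjacent runs with a running maximum (alternative algorithm, winners emerge in order).

-- ===== PORT A =====
-- int(n) for a single character n; `none` (Python ValueError, e.g. on '-') is excluded by Pre_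
def pyChrInt (c : Char) : Int := (PySem.Int.ofChars? [c]).getD 0

def solution (a : List Int) : List Int :=
  let digits : List Int :=
    a.foldl (fun acc i => acc ++ (PySem.Int.toChars i).map pyChrInt) []
  let freq := PySem.Dict.counter digits
  match PySem.List.max? freq.values (fun v => v) with
  | none => []  -- max() on an empty sequence raises ValueError: excluded by Pre_
  | some m =>
    let topKeys := (freq.items.filter (fun p => p.2 == m)).map (fun p => p.1)
    PySem.List.sorted topKeys (fun k => k)

-- ===== PORT B =====
-- the loop body: state (best, m, run, prev)
def stepB (st : List Int × Int × Int × Option Int) (d : Int) : List Int × Int × Int × Option Int :=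
  let best := st.1; let m := st.2.1; let run0 := st.2.2.1; let prev := st.2.2.2
  let run := if prev == some d then run0 + 1 else 1
  if run > m then ([d], run, run, some d)
  else if run == m then (best ++ [d], m, run, some d)
  else (best, m, run, some d)

def solution_alt (a : List Int) : List Int :=
  let digits := PySem.List.sorted (a.flatMap (fun i => (PySem.Int.toChars i).map pyChrInt)) (fun x => x)
  (digits.foldl stepB ([], 0, 0, none)).1

-- ===== PRECONDITION & SPEC =====
-- Pre_ excludes exactly the inputs on which A raises ValueError: the empty list (max() of an
-- empty sequence) and lists containing a negative number (int('-') on the sign character).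
def Pre_solution (a : List Int) : Prop := a ≠ [] ∧ ∀ n ∈ a, 0 ≤ n
instance (a : List Int) : Decidable (Pre_solution a) := by unfold Pre_solution; infer_instance
def pvWitness_solution : List Int := [101, 7]

def Spec_solution (a : List Int) (out : List Int) : Prop := out = solution_alt a
instance (a : List Int) (out : List Int) : Decidable (Spec_solution a out) := by unfold Spec_solution; infer_instance

-- ===== CLAIM (what is proved, stated in full; the proofs are below) =====
def Claim_equal_solution : Prop := ∀ (a : List Int), Dom_solution a → Pre_solution a → Spec_solution a (solution a)

-- ===== LEMMAS AND PROOFS =====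

-- digits of m in low-to-high order (proof-side model of both ports' digit extraction)
def lowDigits (m : Nat) : List Nat :=
  m % 10 :: (if h : m / 10 = 0 then [] else lowDigits (m / 10))
termination_by m
decreasing_by omega

lemma lowDigits_lt (m : Nat) : ∀ d ∈ lowDigits m, d < 10 := by
  induction m using Nat.strong_induction_on with
  | _ m ih =>
    rw [lowDigits]
    intro d hd
    rcases List.mem_cons.mp hd with h | h
    · omega
    · split at h
      · simp at h
      · exact ih (m / 10) (by omega) d h

lemma toDigitsCore_eq (f : Nat) : ∀ m acc, m < f →
    Nat.toDigitsCore 10 f m acc = ((lowDigits m).reverse.map Nat.digitChar) ++ acc := by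
  induction f with
  | zero => intro m acc h; omega
  | succ f ih =>
    intro m acc h
    rw [lowDigits]
    show (if m / 10 = 0 then (m % 10).digitChar :: acc
          else Nat.toDigitsCore 10 f (m / 10) ((m % 10).digitChar :: acc)) = _
    split
    · next h0 => simp
    · next h0 =>
      rw [ih (m / 10) _ (by omega)]
      simp

lemma pyChrInt_digitChar (d : Nat) (hd : d < 10) : pyChrInt (Nat.digitChar d) = (d : Int) := by
  interval_cases d <;> decide

-- A's per-number digit list, for n ≥ 0
lemma toChars_map_eq (n : Int) (hn : 0 ≤ n) :
    (PySem.Int.toChars n).map pyChrInt = (lowDigits n.toNat).reverse.map (fun (d : Nat) => (d : Int)) := by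
  unfold PySem.Int.toChars
  rw [if_neg (by omega)]
  unfold Nat.toDigits
  rw [toDigitsCore_eq (n.toNat + 1) n.toNat [] (by omega)]
  rw [List.append_nil, List.map_map]
  exact List.map_congr_left (fun d hd =>
    pyChrInt_digitChar d (lowDigits_lt _ d (List.mem_reverse.mp hd)))

-- the digit stream both ports extract
def digitsA (a : List Int) : List Int :=
  a.flatMap (fun i => (PySem.Int.toChars i).map pyChrInt)

lemma digitsA_mem (a : List Int) (ha : ∀ n ∈ a, 0 ≤ n) :
    ∀ k ∈ digitsA a, ∃ d : Nat, d < 10 ∧ k = (d : Int) := by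
  intro k hk
  rcases List.mem_flatMap.mp hk with ⟨i, hi, hki⟩
  rw [toChars_map_eq i (ha i hi)] at hki
  rcases List.mem_map.mp hki with ⟨d, hd, rfl⟩
  exact ⟨d, lowDigits_lt _ d (List.mem_reverse.mp hd), rfl⟩

lemma lowDigits_ne_nil (m : Nat) : lowDigits m ≠ [] := by
  rw [lowDigits]; simp

lemma digitsA_ne_nil (a : List Int) (hne : a ≠ []) (ha : ∀ n ∈ a, 0 ≤ n) :
    digitsA a ≠ [] := by
  rcases a with _ | ⟨i, t⟩
  · exact absurd rfl hne
  · unfold digitsA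
    rw [List.flatMap_cons, toChars_map_eq i (ha i List.mem_cons_self)]
    rcases h : lowDigits i.toNat with _ | _
    · exact absurd h (lowDigits_ne_nil _)
    · simp

-- ---- the canonical sorted digit stream: counts laid out digit by digit ----
def sortedFlat (c : Nat → Nat) (t : Nat) : List Int :=
  (List.range t).flatMap (fun d => List.replicate (c d) ((d : Nat) : Int))

lemma sortedFlat_succ (c : Nat → Nat) (t : Nat) :
    sortedFlat c (t+1) = sortedFlat c t ++ List.replicate (c t) ((t : Nat) : Int) := by
  unfold sortedFlat
  rw [List.range_succ, List.flatMap_append]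
  simp

lemma mem_sortedFlat (c : Nat → Nat) (t : Nat) :
    ∀ x ∈ sortedFlat c t, ∃ e : Nat, e < t ∧ x = ((e : Nat) : Int) := by
  intro x hx
  rcases List.mem_flatMap.mp hx with ⟨d, hd, hxd⟩
  exact ⟨d, List.mem_range.mp hd, (List.eq_of_mem_replicate hxd)⟩

lemma count_sortedFlat (c : Nat → Nat) (t : Nat) (k : Int) :
    (sortedFlat c t).count k =
      (if h : ∃ e : Nat, e < t ∧ k = ((e : Nat) : Int) then c k.toNat else 0) := by
  induction t with
  | zero => simp [sortedFlat]
  | succ t ih =>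
    rw [sortedFlat_succ, List.count_append, ih, List.count_replicate]
    by_cases hkt : k = ((t : Nat) : Int)
    · subst hkt
      rw [if_pos (by simp)]
      rw [dif_neg (by rintro ⟨e, he, h⟩; exact absurd (by exact_mod_cast h : t = e) (by omega))]
      rw [dif_pos ⟨t, by omega, rfl⟩]
      simp
    · rw [if_neg (by simp; intro h; exact hkt h.symm)]
      by_cases hk : ∃ e : Nat, e < t ∧ k = ((e : Nat) : Int)
      · rcases hk with ⟨e, he, rfl⟩
        rw [dif_pos ⟨e, he, rfl⟩, dif_pos ⟨e, by omega, rfl⟩]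
        simp
      · have hcon : ¬∃ e : Nat, e < t + 1 ∧ k = ((e : Nat) : Int) := by
          rintro ⟨e, he, h⟩
          by_cases het : e = t
          · exact hkt (by rw [h, het])
          · exact hk ⟨e, by omega, h⟩
        rw [dif_neg hk, dif_neg hcon]
        try simp

lemma sortedFlat_pairwise (c : Nat → Nat) (t : Nat) :
    (sortedFlat c t).Pairwise (· ≤ ·) := by
  induction t with
  | zero => simp [sortedFlat]
  | succ t ih =>
    rw [sortedFlat_succ]
    apply List.pairwise_append.mpr
    refine ⟨ih, List.pairwise_replicate.mpr (by simp), ?_⟩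
    intro x hx y hy
    rcases mem_sortedFlat c t x hx with ⟨e, he, rfl⟩
    rw [List.eq_of_mem_replicate hy]
    exact_mod_cast Nat.le_of_lt he

-- B's sorted digit list IS sortedFlat of its counts
lemma sorted_digits_eq (a : List Int) (ha : ∀ n ∈ a, 0 ≤ n) :
    PySem.List.sorted (digitsA a) (fun x => x) =
      sortedFlat (fun d => (digitsA a).count ((d : Nat) : Int)) 10 := by
  apply PySem.List.sorted_id_eq_of_perm_of_pairwise
  · apply (List.perm_iff_count).mpr
    intro k
    rw [count_sortedFlat]
    by_cases hk : ∃ e : Nat, e < 10 ∧ k = ((e : Nat) : Int)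
    · rcases hk with ⟨e, he, rfl⟩
      rw [dif_pos ⟨e, he, rfl⟩]
      simp
    · rw [dif_neg hk]
      symm
      rw [List.count_eq_zero]
      intro hmem
      rcases digitsA_mem a ha k hmem with ⟨d, hd, rfl⟩
      exact hk ⟨d, hd, rfl⟩
  · exact sortedFlat_pairwise _ _

-- ---- running maximum / winners over the first t digits ----
def bigM (c : Nat → Nat) : Nat → Int
  | 0 => 0
  | t+1 => max (bigM c t) ((c t : Nat) : Int)

def bigBest (c : Nat → Nat) (t : Nat) : List Int :=
  if bigM c t = 0 then []
  else ((List.range t).filter (fun d => ((c d : Nat) : Int) = bigM c t)).map (fun d => ((d : Nat) : Int))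

lemma bigM_nonneg (c : Nat → Nat) (t : Nat) : 0 ≤ bigM c t := by
  induction t with
  | zero => simp [bigM]
  | succ t ih => simp only [bigM]; positivity

lemma bigM_ge (c : Nat → Nat) (t : Nat) : ∀ d, d < t → ((c d : Nat) : Int) ≤ bigM c t := by
  induction t with
  | zero => omega
  | succ t ih =>
    intro d hd
    simp only [bigM]
    by_cases h : d < t
    · exact le_max_of_le_left (ih d h)
    · have : d = t := by omega
      subst this
      exact le_max_right _ _
lemma bigM_attained (c : Nat → Nat) (t : Nat) :
    bigM c t = 0 ∨ ∃ d, d < t ∧ bigM c t = ((c d : Nat) : Int) := by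
  induction t with
  | zero => left; rfl
  | succ t ih =>
    rcases le_or_gt ((c t : Nat) : Int) (bigM c t) with h | h
    · rw [show bigM c (t+1) = max (bigM c t) ((c t : Nat) : Int) from rfl, max_eq_left h]
      rcases ih with h0 | ⟨d, hd, hdd⟩
      · exact Or.inl h0
      · exact Or.inr ⟨d, by omega, hdd⟩
    · right
      refine ⟨t, by omega, ?_⟩
      rw [show bigM c (t+1) = max (bigM c t) ((c t : Nat) : Int) from rfl,
          max_eq_right (le_of_lt h)]

-- ---- the run-scan loop, group by group ----
-- j further copies of d from a state already mid-run with run = m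
lemma stepB_run_eq (d : Int) : ∀ (j : Nat) (best : List Int) (m : Int),
    (List.replicate j d).foldl stepB (best, m, m, some d) =
      if j = 0 then (best, m, m, some d) else ([d], m + j, m + j, some d) := by
  intro j
  induction j with
  | zero => intro best m; simp
  | succ j ih =>
    intro best m
    rw [List.replicate_succ, List.foldl_cons]
    have hstep : stepB (best, m, m, some d) d = ([d], m + 1, m + 1, some d) := by
      simp only [stepB]
      split_ifs <;> simp_all
    rw [hstep, ih]
    by_cases hj : j = 0
    · subst hj; simp
    · rw [if_neg hj, if_neg (by omega)]
      try push_cast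
      try simp only [Prod.mk.injEq, true_and, and_true]
      try omega

-- j further copies of d from a state mid-run with run < m
lemma stepB_run_lt (d : Int) : ∀ (j : Nat) (best : List Int) (m r : Int), r < m →
    (List.replicate j d).foldl stepB (best, m, r, some d) =
      if r + j < m then (best, m, r + j, some d)
      else if r + j = m then (best ++ [d], m, m, some d)
      else ([d], r + j, r + j, some d) := by
  intro j
  induction j with
  | zero => intro best m r hr; rw [if_pos (by push_cast; try omega)]; simp
  | succ j ih =>
    intro best m r hr
    rw [List.replicate_succ, List.foldl_cons]
    have hstep : stepB (best, m, r, some d) d =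
        if r + 1 = m then (best ++ [d], m, r + 1, some d) else (best, m, r + 1, some d) := by
      simp only [stepB]
      split_ifs <;> simp_all <;> omega
    rw [hstep]
    by_cases h1 : r + 1 = m
    · rw [if_pos h1, h1, stepB_run_eq]
      by_cases hj : j = 0
      · rw [if_pos hj, if_neg (by omega), if_pos (by push_cast; try omega)]
        try push_cast
        try simp only [Prod.mk.injEq, true_and, and_true]
        try omega
      · rw [if_neg hj, if_neg (by push_cast; try omega), if_neg (by push_cast; try omega)]
        try push_cast
        try simp only [Prod.mk.injEq, true_and, and_true]
        try omega
    · rw [if_neg h1, ih _ _ _ (by omega)]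
      by_cases hlt : r + 1 + (j : Int) < m
      · rw [if_pos hlt, if_pos (by push_cast; try omega)]
        try push_cast
        try simp only [Prod.mk.injEq, true_and, and_true]
        try omega
      · by_cases heq : r + 1 + (j : Int) = m
        · rw [if_neg (by omega), if_pos heq, if_neg (by push_cast; try omega),
              if_pos (by push_cast; try omega)]
          try push_cast
          try simp only [Prod.mk.injEq, true_and, and_true]
          try omega
        · rw [if_neg (by omega), if_neg heq, if_neg (by push_cast; try omega),
              if_neg (by push_cast; try omega)]
          try push_cast
          try simp only [Prod.mk.injEq, true_and, and_true]
          try omega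

-- one whole group of k ≥ 1 copies of a fresh digit d
lemma stepB_group (d : Int) (k : Nat) (hk : 1 ≤ k) (best : List Int) (m : Int) (r : Int)
    (p : Option Int) (hp : p ≠ some d) (hm : 0 ≤ m) :
    (List.replicate k d).foldl stepB (best, m, r, p) =
      if m < (k : Int) then ([d], (k : Int), (k : Int), some d)
      else if (k : Int) = m then (best ++ [d], m, (k : Int), some d)
      else (best, m, (k : Int), some d) := by
  obtain ⟨j, rfl⟩ : ∃ j, k = j + 1 := ⟨k - 1, by omega⟩
  rw [List.replicate_succ, List.foldl_cons]
  have hstep : stepB (best, m, r, p) d =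
      if m < 1 then ([d], 1, 1, some d)
      else if (1 : Int) = m then (best ++ [d], m, 1, some d)
      else (best, m, 1, some d) := by
    simp only [stepB]
    split_ifs <;> simp_all <;> omega
  rw [hstep]
  by_cases h1 : m < 1
  · have hm0 : m = 0 := by omega
    rw [if_pos h1]
    by_cases hj : j = 0
    · rw [stepB_run_eq, if_pos hj, if_pos (by push_cast; try omega)]
      try push_cast
      try simp only [Prod.mk.injEq, true_and, and_true]
      try omega
    · rw [stepB_run_eq, if_neg hj, if_pos (by push_cast; try omega)]
      try push_cast
      try simp only [Prod.mk.injEq, true_and, and_true]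
      try omega
  · rw [if_neg h1]
    by_cases h2 : (1 : Int) = m
    · rw [if_pos h2, ← h2, stepB_run_eq]
      by_cases hj : j = 0
      · rw [if_pos hj, if_neg (by omega), if_pos (by push_cast; try omega)]
        try push_cast
        try simp only [Prod.mk.injEq, true_and, and_true]
        try omega
      · rw [if_neg hj, if_pos (by push_cast; try omega)]
        try push_cast
        try simp only [Prod.mk.injEq, true_and, and_true]
        try omega
    · rw [if_neg h2, stepB_run_lt d j best m 1 (by omega)]
      by_cases hlt : 1 + (j : Int) < m
      · rw [if_pos hlt, if_neg (by push_cast; try omega), if_neg (by push_cast; try omega)]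
        try push_cast
        try simp only [Prod.mk.injEq, true_and, and_true]
        try omega
      · by_cases heq : 1 + (j : Int) = m
        · rw [if_neg (by omega), if_pos heq, if_neg (by push_cast; try omega),
              if_pos (by push_cast; try omega)]
          try push_cast
          try simp only [Prod.mk.injEq, true_and, and_true]
          try omega
        · rw [if_neg (by omega), if_neg heq, if_pos (by push_cast; try omega)]
          try push_cast
          try simp only [Prod.mk.injEq, true_and, and_true]
          try omega

-- the whole scan over sortedFlat computes (bigBest, bigM, _, _)
lemma scan_sortedFlat (c : Nat → Nat) : ∀ t : Nat,
    ∃ r p, (sortedFlat c t).foldl stepB ([], 0, 0, none) = (bigBest c t, bigM c t, r, p) ∧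
      (p = none ∨ ∃ e : Nat, e < t ∧ p = some ((e : Nat) : Int)) := by
  intro t
  induction t with
  | zero => exact ⟨0, none, by simp [sortedFlat, bigBest, bigM], Or.inl rfl⟩
  | succ t ih =>
    rcases ih with ⟨r, p, hfold, hp⟩
    rw [sortedFlat_succ, List.foldl_append, hfold]
    by_cases hc : c t = 0
    · refine ⟨r, p, ?_, ?_⟩
      · rw [hc]
        simp only [List.replicate_zero, List.foldl_nil]
        have hM : bigM c (t+1) = bigM c t := by
          simp only [bigM, hc]
          exact max_eq_left (bigM_nonneg c t)
        have hB : bigBest c (t+1) = bigBest c t := by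
          unfold bigBest
          rw [hM, List.range_succ, List.filter_append]
          by_cases h0 : bigM c t = 0
          · rw [if_pos h0, if_pos h0]
          · rw [if_neg h0, if_neg h0]
            have : List.filter (fun d => decide (((c d : Nat) : Int) = bigM c t)) [t] = [] := by
              simp [hc, Ne.symm h0]
            rw [this, List.append_nil]
        rw [hM, hB]
      · rcases hp with h | ⟨e, he, hpe⟩
        · exact Or.inl h
        · exact Or.inr ⟨e, by omega, hpe⟩
    · have hpne : p ≠ some ((t : Nat) : Int) := by
        rcases hp with h | ⟨e, he, hpe⟩
        · rw [h]; simp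
        · rw [hpe]
          intro h
          have : ((e : Nat) : Int) = ((t : Nat) : Int) := by simpa using h
          have : e = t := by exact_mod_cast this
          omega
      rw [stepB_group ((t : Nat) : Int) (c t) (by omega) _ _ _ _ hpne (bigM_nonneg c t)]
      have hMsucc : bigM c (t+1) = max (bigM c t) ((c t : Nat) : Int) := rfl
      by_cases hlt : bigM c t < ((c t : Nat) : Int)
      · rw [if_pos hlt]
        refine ⟨((c t : Nat) : Int), some ((t : Nat) : Int), ?_, Or.inr ⟨t, by omega, rfl⟩⟩
        have hM : bigM c (t+1) = ((c t : Nat) : Int) := by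
          rw [hMsucc]; exact max_eq_right (le_of_lt hlt)
        have hB : bigBest c (t+1) = [((t : Nat) : Int)] := by
          unfold bigBest
          rw [hM, if_neg (by exact_mod_cast hc), List.range_succ, List.filter_append]
          have h1 : List.filter (fun d => decide (((c d : Nat) : Int) = ((c t : Nat) : Int))) (List.range t) = [] := by
            apply List.filter_eq_nil_iff.mpr
            intro d hd
            have := bigM_ge c t d (List.mem_range.mp hd)
            simp only [decide_eq_true_eq]
            omega
          rw [h1]
          simp
        rw [hM, hB]
      · rw [if_neg hlt]
        have hM : bigM c (t+1) = bigM c t := by rw [hMsucc]; exact max_eq_left (by omega)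
        by_cases heq : ((c t : Nat) : Int) = bigM c t
        · rw [if_pos heq]
          refine ⟨((c t : Nat) : Int), some ((t : Nat) : Int), ?_, Or.inr ⟨t, by omega, rfl⟩⟩
          have hMne : bigM c t ≠ 0 := by
            rw [← heq]
            exact_mod_cast hc
          have hB : bigBest c (t+1) = bigBest c t ++ [((t : Nat) : Int)] := by
            unfold bigBest
            rw [hM, if_neg hMne, if_neg hMne, List.range_succ, List.filter_append]
            have h1 : List.filter (fun d => decide (((c d : Nat) : Int) = bigM c t)) [t] = [t] := by
              simp [heq]
            rw [h1, List.map_append]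
            rfl
          rw [hM, hB]
        · rw [if_neg heq]
          refine ⟨((c t : Nat) : Int), some ((t : Nat) : Int), ?_, Or.inr ⟨t, by omega, rfl⟩⟩
          have hB : bigBest c (t+1) = bigBest c t := by
            unfold bigBest
            rw [hM, List.range_succ, List.filter_append]
            by_cases h0 : bigM c t = 0
            · rw [if_pos h0, if_pos h0]
            · rw [if_neg h0, if_neg h0]
              have h1 : List.filter (fun d => decide (((c d : Nat) : Int) = bigM c t)) [t] = [] := by
                simp [heq]
              rw [h1, List.append_nil]
          rw [hM, hB]

theorem solution_spec : Claim_equal_solution := by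
  intro a _hdom hpre
  obtain ⟨hne, hpos⟩ := hpre
  unfold Spec_solution solution solution_alt
  simp only []
  -- normalize A's digits fold
  rw [PySem.List.foldl_append_eq_flatMap (fun i => (PySem.Int.toChars i).map pyChrInt) a []]
  rw [List.nil_append]
  have hflat : List.flatMap (fun i => (PySem.Int.toChars i).map pyChrInt) a = digitsA a := rfl
  rw [hflat]
  set DA := digitsA a with hDA
  set c : Nat → Nat := fun d => DA.count ((d : Nat) : Int) with hc
  -- B's side: the scan over the sorted digits
  rw [sorted_digits_eq a hpos]
  rcases scan_sortedFlat c 10 with ⟨r, p, hfold, -⟩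
  rw [hfold]
  -- A's max exists
  have hDAne : DA ≠ [] := digitsA_ne_nil a hne hpos
  have hvals : (PySem.Dict.counter DA).values
      = (PySem.Set.ofList DA).map (fun k => ((DA.count k : Nat) : Int)) := by
    show ((PySem.Dict.counter DA).items).map (fun p => p.2) = _
    rw [PySem.Dict.items_counter]
    simp
  have hSne : (PySem.Set.ofList DA : List Int) ≠ [] := by
    rcases h : (PySem.Set.ofList DA : List Int) with _ | _
    · rcases List.exists_mem_of_ne_nil DA hDAne with ⟨x, hx⟩
      have := (PySem.Set.mem_ofList DA x).mpr hx
      rw [h] at this; simp at this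
    · simp
  have hvne : (PySem.Dict.counter DA).values ≠ [] := by
    rw [hvals]; simpa using hSne
  rcases hm : PySem.List.max? (PySem.Dict.counter DA).values (fun v => v) with _ | m
  · exact absurd ((PySem.List.max?_eq_none_iff _ _).mp hm) hvne
  -- properties of m
  have hmmem := PySem.List.max?_mem hm
  have hmmax := PySem.List.max?_isMax hm
  rw [hvals] at hmmem hmmax
  rcases List.mem_map.mp hmmem with ⟨k0, hk0S, hk0⟩
  have hk0DA : k0 ∈ DA := (PySem.Set.mem_ofList DA k0).mp hk0S
  have hm1 : 1 ≤ m := by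
    rw [← hk0]
    have := List.count_pos_iff.mpr hk0DA
    exact_mod_cast this
  -- bigM c 10 = m
  have hMm : bigM c 10 = m := by
    have hle : m ≤ bigM c 10 := by
      rcases digitsA_mem a hpos k0 hk0DA with ⟨d0, hd0, rfl⟩
      have := bigM_ge c 10 d0 (by omega)
      rw [← hk0]
      simpa [hc] using this
    have hge : bigM c 10 ≤ m := by
      rcases bigM_attained c 10 with h0 | ⟨d, hd, hdd⟩
      · omega
      · by_cases hdz : c d = 0
        · rw [hdd, hdz]; push_cast; omega
        · have hdDA : ((d : Nat) : Int) ∈ DA := List.count_pos_iff.mp (by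
            simp only [hc] at hdz
            omega)
          have := hmmax _ (List.mem_map.mpr ⟨((d : Nat) : Int), (PySem.Set.mem_ofList DA _).mpr hdDA, rfl⟩)
          rw [hdd]
          simpa [hc] using this
    omega
  rw [hMm] at hfold ⊢
  -- final list equality: A's sorted topKeys = bigBest
  show PySem.List.sorted
      (((PySem.Dict.counter DA).items.filter (fun p => p.2 == m)).map (fun p => p.1)) (fun k => k)
      = bigBest c 10
  apply PySem.List.sorted_eq_of_perm_of_pairwise_lt
  · -- Perm: bigBest ~ topKeys
    have htop : ((PySem.Dict.counter DA).items.filter (fun p => p.2 == m)).map (fun p => p.1)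
        = (PySem.Set.ofList DA : List Int).filter (fun k => ((DA.count k : Nat) : Int) == m) := by
      rw [PySem.Dict.items_counter, List.filter_map, List.map_map]
      simp [Function.comp_def]
    rw [htop]
    have hB : bigBest c 10 = ((List.range 10).filter (fun d => ((c d : Nat) : Int) = m)).map (fun d => ((d : Nat) : Int)) := by
      unfold bigBest
      rw [hMm, if_neg (by omega)]
    rw [hB]
    apply (List.perm_ext_iff_of_nodup
      (List.Nodup.map (fun x y h => by exact_mod_cast h) (List.Nodup.filter _ (List.nodup_range)))
      (List.Nodup.filter _ (PySem.Set.nodup_ofList DA))).mpr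
    intro k
    simp only [List.mem_filter, List.mem_map, PySem.Set.mem_ofList]
    constructor
    · rintro ⟨d, hd, rfl⟩
      obtain ⟨hd10, hdm⟩ := hd
      have hdm' : ((c d : Nat) : Int) = m := by simpa using hdm
      simp only [hc] at hdm'
      have hkDA : ((d : Nat) : Int) ∈ DA := List.count_pos_iff.mp (by omega)
      exact ⟨hkDA, by simpa using hdm'⟩
    · rintro ⟨hkDA, hkeq⟩
      rcases digitsA_mem a hpos k hkDA with ⟨d, hd, rfl⟩
      refine ⟨d, ⟨List.mem_range.mpr hd, ?_⟩, rfl⟩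
      simp only [hc]
      simpa using hkeq
  · -- bigBest is Pairwise (<)
    have hB : bigBest c 10 = ((List.range 10).filter (fun d => ((c d : Nat) : Int) = m)).map (fun d => ((d : Nat) : Int)) := by
      unfold bigBest
      rw [hMm, if_neg (by omega)]
    rw [hB]
    apply List.Pairwise.map (fun d : Nat => ((d : Nat) : Int)) (fun x y (h : x < y) => by simpa using h)
    exact List.Pairwise.filter _ (List.pairwise_lt_range)
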